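-- pv_equiv track=rewrite | github.com/WilliamsNimi/Chess_Logic | Python_Script/utils2.py | threatened_squares_king
-- ===== SOURCE A (Python) =====
-- def threatened_squares_king(King, Board, squares):
--     ###
--     # threatened_squares_king- This function aims to get the squares threatened by kings
--     # Description: This function gets all the squares threatened by any given king on the board
--     # @King: This is the exact king piece to check threats for
--     # @Board: The exact Board instance to scan
--     # @squares: This is the list of standard chess squares it needs to pass to the individual piece functions checking for threats
--     # Return: Returns a list of all squares threatened by a given king
--     ###
--     x_coord = 0
--     y_coord = 0
--     king_threatened_squares = []
--
--     for key, value in Board.items():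
--         if value[2] == King:
--             x_coord = value[0]
--             y_coord = value[1]
--
--             for square_key, values in squares.items():
--                 if (((values[0] - value[0] == 0) and (values[1] - value[1] == 1)) or (
--                         (values[0] - value[0] == 1) and (values[1] - value[1] == 0)) or (
--                         (values[0] - value[0] == -1) and (values[1] - value[1] == 0)) or (
--                         (values[0] - value[0] == 0) and (values[1] - value[1] == -1)) or (
--                         (values[0] - value[0] == 1) and (values[1] - value[1] == 1)) or (
--                         (values[0] - value[0] == -1) and (values[1] - value[1] == 1)) or (
--                         (values[0] - value[0] == 1) and (values[1] - value[1] == -1)) or (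
--                         (values[0] - value[0] == -1) and (values[1] - value[1] == -1))):
--                     if (Board[square_key][2] != ""):  # Checks if the square is not empty
--                         king_threatened_squares.append(square_key)
--                     else:
--                         king_threatened_squares.append(square_key)
--
--     return (king_threatened_squares)
-- ===== SOURCE B (Python) =====
-- def threatened_squares_king(King, Board, squares):
--     # Index squares by coordinate once, then probe the 8 neighbor coordinates per king.
--     pos = {}
--     for i, (sk, v) in enumerate(squares.items()):
--         pos.setdefault((v[0], v[1]), []).append((i, sk))
--     out = []
--     for value in Board.values():
--         if value[2] == King:
--             x, y = value[0], value[1]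
--             hits = []
--             for dx, dy in ((-1, -1), (-1, 0), (-1, 1), (0, -1), (0, 1), (1, -1), (1, 0), (1, 1)):
--                 hits.extend(pos.get((x + dx, y + dy), []))
--             hits.sort(key=lambda t: t[0])
--             out.extend(sk for _, sk in hits)
--     return out
-- ===== Notes on version B (the rewrite author's own statement) =====
-- stated objective: alternative
-- what changed: B builds a coordinate->(index,key) dictionary over the squares once and probes only the 8 neighbor coordinates of each king, restoring square order via the stored indices, instead of A's scan of every square per matching board piece; B also drops A's dead occupied-square check whose two branches are identical.
import Mathlib
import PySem

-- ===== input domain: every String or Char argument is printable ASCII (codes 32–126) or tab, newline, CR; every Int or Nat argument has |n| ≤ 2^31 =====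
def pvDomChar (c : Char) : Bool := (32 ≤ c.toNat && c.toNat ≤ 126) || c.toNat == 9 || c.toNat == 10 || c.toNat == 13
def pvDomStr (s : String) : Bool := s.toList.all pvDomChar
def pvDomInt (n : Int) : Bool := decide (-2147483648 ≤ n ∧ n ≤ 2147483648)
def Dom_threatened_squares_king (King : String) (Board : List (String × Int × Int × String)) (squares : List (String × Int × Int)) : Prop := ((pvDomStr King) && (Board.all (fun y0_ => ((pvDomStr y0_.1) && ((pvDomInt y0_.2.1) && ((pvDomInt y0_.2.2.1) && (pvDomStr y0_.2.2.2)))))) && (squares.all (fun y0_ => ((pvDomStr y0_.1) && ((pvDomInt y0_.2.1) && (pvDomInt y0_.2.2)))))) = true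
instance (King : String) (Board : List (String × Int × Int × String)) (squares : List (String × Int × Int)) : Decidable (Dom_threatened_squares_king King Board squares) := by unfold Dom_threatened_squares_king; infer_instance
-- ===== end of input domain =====

-- B replaces A's per-king scan of all squares by a coordinate→(index,key) dictionary built once,
-- probing only the 8 neighbor coordinates of each king and restoring square order by index.

-- ===== PORT A =====
-- A's 8-way adjacency disjunction (value[0]-x, value[1]-y pattern), shared with Pre_
def pvKingAdj (x y sx sy : Int) : Bool :=
  (sx - x == 0 && sy - y == 1) || (sx - x == 1 && sy - y == 0) ||
  (sx - x == -1 && sy - y == 0) || (sx - x == 0 && sy - y == -1) ||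
  (sx - x == 1 && sy - y == 1) || (sx - x == -1 && sy - y == 1) ||
  (sx - x == 1 && sy - y == -1) || (sx - x == -1 && sy - y == -1)

-- A's body 'if Board[square_key][2] != "": append else append'; the lookup is Dict.get?;
-- on none Python raises KeyError (excluded by Pre_), so that branch yields acc unchanged
def pvLookupAppend (Board : List (String × Int × Int × String)) (acc : List String) (k : String) : List String :=
  match (PySem.Dict.mk Board).get? k with
  | some v => if v.2.2 ≠ "" then acc ++ [k] else acc ++ [k]
  | none => acc

-- literal port of A: state (x_coord, y_coord, king_threatened_squares)
def threatened_squares_king (King : String) (Board : List (String × Int × Int × String)) (squares : List (String × Int × Int)) : List String :=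
  (Board.foldl (fun (st : Int × Int × List String) kv =>
      if kv.2.2.2 = King then
        (kv.2.1, kv.2.2.1,
          squares.foldl (fun acc sq =>
            if pvKingAdj kv.2.1 kv.2.2.1 sq.2.1 sq.2.2 then
              pvLookupAppend Board acc sq.1
            else acc) st.2.2)
      else st)
    ((0 : Int), (0 : Int), ([] : List String))).2.2

-- ===== PORT B =====
def pvKingDeltas : List (Int × Int) :=
  [(-1, -1), (-1, 0), (-1, 1), (0, -1), (0, 1), (1, -1), (1, 0), (1, 1)]

def threatened_squares_king_alt (King : String) (Board : List (String × Int × Int × String)) (squares : List (String × Int × Int)) : List String :=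
  let pos : PySem.Dict (Int × Int) (List (Int × String)) :=
    (PySem.List.enumerate squares).foldl
      (fun d p => d.modify (p.2.2.1, p.2.2.2) [] (· ++ [(p.1, p.2.1)])) PySem.Dict.empty
  Board.foldl (fun out kv =>
    if kv.2.2.2 = King then
      let hits := pvKingDeltas.foldl
        (fun h d => h ++ pos.getD (kv.2.1 + d.1, kv.2.2.1 + d.2) []) []
      out ++ (PySem.List.sorted hits (fun t => t.1)).map (fun t => t.2)
    else out) []

-- ===== PRECONDITION & SPEC =====
-- Pre_ excludes exactly the inputs on which A raises KeyError: a square adjacent to some piece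
-- equal to King whose key is not a key of Board (A looks up Board[square_key] there).
def Pre_threatened_squares_king (King : String) (Board : List (String × Int × Int × String)) (squares : List (String × Int × Int)) : Prop :=
  ∀ kv ∈ Board, kv.2.2.2 = King → ∀ sq ∈ squares,
    pvKingAdj kv.2.1 kv.2.2.1 sq.2.1 sq.2.2 = true → sq.1 ∈ Board.map (fun b => b.1)
instance (King : String) (Board : List (String × Int × Int × String)) (squares : List (String × Int × Int)) : Decidable (Pre_threatened_squares_king King Board squares) := by unfold Pre_threatened_squares_king; infer_instance

def pvWitness_threatened_squares_king : String × (List (String × Int × Int × String)) × (List (String × Int × Int)) :=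
  ("K", [("a1", 0, 0, "K"), ("a2", 0, 1, "")], [("a1", 0, 0), ("a2", 0, 1)])

def Spec_threatened_squares_king (King : String) (Board : List (String × Int × Int × String)) (squares : List (String × Int × Int)) (out : List String) : Prop := out = threatened_squares_king_alt King Board squares
instance (King : String) (Board : List (String × Int × Int × String)) (squares : List (String × Int × Int)) (out : List String) : Decidable (Spec_threatened_squares_king King Board squares out) := by unfold Spec_threatened_squares_king; infer_instance

-- ===== CLAIM (what is proved, stated in full; the proofs are below) =====
def Claim_equal_threatened_squares_king : Prop := ∀ (King : String) (Board : List (String × Int × Int × String)) (squares : List (String × Int × Int)), Dom_threatened_squares_king King Board squares → Pre_threatened_squares_king King Board squares → Spec_threatened_squares_king King Board squares (threatened_squares_king King Board squares)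
-- ===== LEMMAS AND PROOFS =====

-- two disjoint filters concatenated are a permutation of the filter of the disjunction
theorem pvFilterOrPerm {α : Type} (P Q : α → Bool) (l : List α)
    (h : ∀ a ∈ l, ¬(P a = true ∧ Q a = true)) :
    (l.filter P ++ l.filter Q).Perm (l.filter (fun a => P a || Q a)) := by
  induction l with
  | nil => simp
  | cons a l ih =>
    have ha := h a (by simp)
    have ih' := ih (fun b hb hpq => h b (by simp [hb]) hpq)
    by_cases hP : P a = true
    · have hQ : Q a = false := by
        cases hq : Q a with
        | false => rfl
        | true => exact absurd ⟨hP, hq⟩ ha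
      simp only [List.filter_cons, hP, hQ, Bool.true_or, if_true]
      simpa using ih'.cons a
    · have hP' : P a = false := by simpa using hP
      by_cases hQ : Q a = true
      · simp only [List.filter_cons, hP', hQ, Bool.false_or, if_true]
        exact List.perm_middle.trans (ih'.cons a)
      · have hQ' : Q a = false := by simpa using hQ
        simp only [List.filter_cons, hP', hQ', Bool.false_or]
        exact ih'

-- flatMap of per-key filters over distinct keys permutes the membership filter
theorem pvFlatMapFilterPerm (l : List ((Int × Int) × (Int × String)))
    (ks : List (Int × Int)) (hk : ks.Nodup) :
    (ks.flatMap (fun c => l.filter (fun p => p.1 == c))).Perm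
      (l.filter (fun p => decide (p.1 ∈ ks))) := by
  induction ks with
  | nil => simp
  | cons c ks ih =>
    have hnot : c ∉ ks := (List.nodup_cons.mp hk).1
    have ih' := ih (List.nodup_cons.mp hk).2
    have hdisj : ∀ p ∈ l, ¬((p.1 == c) = true ∧ decide (p.1 ∈ ks) = true) := by
      intro p _ hpq
      obtain ⟨h1, h2⟩ := hpq
      have e1 : p.1 = c := by simpa using h1
      have e2 : p.1 ∈ ks := by simpa using h2
      exact hnot (e1 ▸ e2)
    rw [List.flatMap_cons]
    have step1 := ih'.append_left (l.filter (fun p => p.1 == c))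
    have step2 := pvFilterOrPerm (fun p => p.1 == c) (fun p => decide (p.1 ∈ ks)) l hdisj
    have step3 : l.filter (fun p => (p.1 == c) || decide (p.1 ∈ ks))
        = l.filter (fun p => decide (p.1 ∈ c :: ks)) := by
      apply List.filter_congr; intro p _
      by_cases h : p.1 = c <;> simp [h]
    exact (step1.trans step2).trans (step3 ▸ List.Perm.refl _)

-- enumerate-filter-map over the second component collapses to filter over the list
theorem pvEnumFilterMap (squares : List (String × Int × Int)) (c : (String × Int × Int) → Bool)
    (s : Int) :
    ((PySem.List.enumerate squares s).filter (fun q => c q.2)).map (fun q => q.2.1)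
      = (squares.filter c).map (fun sq => sq.1) := by
  induction squares generalizing s with
  | nil => simp [PySem.List.enumerate]
  | cons sq squares ih =>
    rw [PySem.List.enumerate_cons]
    by_cases h : c sq = true <;> simp [h, ih]

-- under Pre_, the lookup succeeds and A appends the key in either branch
theorem pvLookupAppend_eq (BoardAll : List (String × Int × Int × String)) (acc : List String)
    (k : String) (hmem : k ∈ BoardAll.map (fun b => b.1)) :
    pvLookupAppend BoardAll acc k = acc ++ [k] := by
  unfold pvLookupAppend
  cases hg : (PySem.Dict.mk BoardAll).get? k with
  | some v => simp
  | none =>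
    exfalso
    have hcon := (PySem.Dict.get?_eq_none_iff_contains _ _).mp hg
    rw [PySem.Dict.contains_mk] at hcon
    obtain ⟨b, hb, hb1⟩ := List.mem_map.mp hmem
    have : BoardAll.any (fun p => p.1 == k) = true :=
      List.any_eq_true.mpr ⟨b, hb, by simp [hb1]⟩
    simp [this] at hcon

-- A's inner loop over squares is filter+map of the square keys (Pre_ makes every lookup succeed)
theorem pvInnerA (BoardAll : List (String × Int × Int × String))
    (squares : List (String × Int × Int)) (x y : Int)
    (h : ∀ sq ∈ squares, pvKingAdj x y sq.2.1 sq.2.2 = true → sq.1 ∈ BoardAll.map (fun b => b.1))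
    (acc : List String) :
    squares.foldl (fun acc sq =>
        if pvKingAdj x y sq.2.1 sq.2.2 then pvLookupAppend BoardAll acc sq.1 else acc) acc
      = acc ++ (squares.filter (fun sq => pvKingAdj x y sq.2.1 sq.2.2)).map (fun sq => sq.1) := by
  induction squares generalizing acc with
  | nil => simp
  | cons sq squares ih =>
    have ih' := ih (fun s hs => h s (by simp [hs]))
    simp only [List.foldl_cons, List.filter_cons]
    by_cases hc : pvKingAdj x y sq.2.1 sq.2.2 = true
    · rw [if_pos hc, if_pos hc, pvLookupAppend_eq BoardAll acc sq.1 (h sq (by simp) hc), ih']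
      simp
    · rw [if_neg hc, if_neg hc, ih']

-- the coordinate index built by B answers a coordinate with the (index, key) pairs of the
-- squares at that coordinate, in order
theorem pvPosGetD (squares : List (String × Int × Int)) (c : Int × Int) :
    ((PySem.List.enumerate squares).foldl
        (fun d p => d.modify (p.2.2.1, p.2.2.2) [] (· ++ [(p.1, p.2.1)])) PySem.Dict.empty).getD c []
      = (((PySem.List.enumerate squares).map
            (fun q => ((q.2.2.1, q.2.2.2), (q.1, q.2.1)))).filter
          (fun p => p.1 == c)).map (fun p => p.2) := by
  have h1 : ∀ (L : List (Int × (String × Int × Int))) (d : PySem.Dict (Int × Int) (List (Int × String))),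
      L.foldl (fun d p => d.modify (p.2.2.1, p.2.2.2) [] (· ++ [(p.1, p.2.1)])) d
        = (L.map (fun q => ((q.2.2.1, q.2.2.2), (q.1, q.2.1)))).foldl
            (fun d p => d.modify p.1 [] (· ++ [p.2])) d := by
    intro L
    induction L with
    | nil => intro d; rfl
    | cons q L ih => intro d; simp only [List.foldl_cons, List.map_cons]; exact ih _
  rw [h1, PySem.Dict.getD_foldl_modify_append]
  simp [PySem.Dict.getD, PySem.Dict.get?, PySem.Dict.empty]

-- the 8 probed neighbor coordinates of one king are pairwise distinct
theorem pvCoordsNodup (x y : Int) : (pvKingDeltas.map (fun d => (x + d.1, y + d.2))).Nodup := by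
  refine List.Nodup.map ?_ (by decide)
  intro d1 d2 hd
  have h1 : x + d1.1 = x + d2.1 := congrArg Prod.fst hd
  have h2 : y + d1.2 = y + d2.2 := congrArg Prod.snd hd
  exact Prod.ext_iff.mpr ⟨by omega, by omega⟩

-- membership in the 8 neighbor coordinates is exactly A's adjacency disjunction
theorem pvMemCoords (x y sx sy : Int) :
    decide ((sx, sy) ∈ pvKingDeltas.map (fun d => (x + d.1, y + d.2)))
      = pvKingAdj x y sx sy := by
  have h1 : ((sx, sy) ∈ pvKingDeltas.map (fun d => (x + d.1, y + d.2)))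
      ↔ (pvKingAdj x y sx sy = true) := by
    simp [pvKingDeltas, pvKingAdj, Prod.ext_iff]
    omega
  have h2 : decide ((sx, sy) ∈ pvKingDeltas.map (fun d => (x + d.1, y + d.2)))
      = decide (pvKingAdj x y sx sy = true) := decide_eq_decide.mpr h1
  rw [h2, Bool.decide_coe]

-- B's inner computation for one king equals A's filter+map over squares
theorem pvInnerB (squares : List (String × Int × Int)) (x y : Int) :
    (PySem.List.sorted
        (pvKingDeltas.foldl (fun h d =>
          h ++ (((PySem.List.enumerate squares).foldl
              (fun d p => d.modify (p.2.2.1, p.2.2.2) [] (· ++ [(p.1, p.2.1)]))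
              PySem.Dict.empty).getD (x + d.1, y + d.2) [])) [])
        (fun t => t.1)).map (fun t => t.2)
      = (squares.filter (fun sq => pvKingAdj x y sq.2.1 sq.2.2)).map (fun sq => sq.1) := by
  set l := ((PySem.List.enumerate squares).map
      (fun q => ((q.2.2.1, q.2.2.2), (q.1, q.2.1)))) with hl
  set coords := pvKingDeltas.map (fun d => (x + d.1, y + d.2)) with hcoords
  have hr : (coords.flatMap (fun c => l.filter (fun p => p.1 == c))).map (fun p => p.2)
      = pvKingDeltas.flatMap (fun d =>
          (l.filter (fun p => p.1 == (x + d.1, y + d.2))).map (fun p => p.2)) := by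
    rw [hcoords]
    simp [List.map_flatMap, List.flatMap_map]
  have hhits : pvKingDeltas.foldl (fun h d =>
        h ++ (((PySem.List.enumerate squares).foldl
            (fun d p => d.modify (p.2.2.1, p.2.2.2) [] (· ++ [(p.1, p.2.1)]))
            PySem.Dict.empty).getD (x + d.1, y + d.2) [])) []
      = (coords.flatMap (fun c => l.filter (fun p => p.1 == c))).map (fun p => p.2) := by
    rw [PySem.List.foldl_append_eq_flatMap]
    simp only [List.nil_append, pvPosGetD]
    rw [hr]
  have hperm := pvFlatMapFilterPerm l coords (pvCoordsNodup x y)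
  have hpairT : (l.filter (fun p => decide (p.1 ∈ coords))).Pairwise
      (fun a b => a.2.1 < b.2.1) := by
    refine List.Pairwise.sublist (List.filter_sublist) ?_
    rw [hl, List.pairwise_map]
    exact PySem.List.pairwise_lt_enumerate squares 0
  have hsorted : PySem.List.sorted
      (pvKingDeltas.foldl (fun h d =>
        h ++ (((PySem.List.enumerate squares).foldl
            (fun d p => d.modify (p.2.2.1, p.2.2.2) [] (· ++ [(p.1, p.2.1)]))
            PySem.Dict.empty).getD (x + d.1, y + d.2) [])) [])
      (fun t => t.1)
      = (l.filter (fun p => decide (p.1 ∈ coords))).map (fun p => p.2) := by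
    rw [hhits]
    refine PySem.List.sorted_eq_of_perm_of_pairwise_lt _ _ _ ((hperm.map (fun p => p.2)).symm) ?_
    rw [List.pairwise_map]
    exact hpairT
  have hfm : l.filter (fun p => decide (p.1 ∈ coords))
      = ((PySem.List.enumerate squares).filter
          (fun q => decide ((q.2.2.1, q.2.2.2) ∈ coords))).map
        (fun q => ((q.2.2.1, q.2.2.2), (q.1, q.2.1))) := by
    rw [hl, List.filter_map]
    rfl
  rw [hsorted, hfm, List.map_map, List.map_map]
  have henum := pvEnumFilterMap squares (fun sq => decide ((sq.2.1, sq.2.2) ∈ coords)) 0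
  simp only [] at henum
  rw [show (((fun t : Int × String => t.2) ∘ fun p : (Int × Int) × Int × String => p.2) ∘
      fun q : Int × (String × Int × Int) => ((q.2.2.1, q.2.2.2), (q.1, q.2.1)))
      = (fun q : Int × (String × Int × Int) => q.2.1) from rfl]
  rw [henum]
  apply congrArg
  apply List.filter_congr
  intro sq _
  exact pvMemCoords x y sq.2.1 sq.2.2

-- the two outer folds over Board agree (A's (x,y) state components never influence the output)
theorem pvOuter (King : String) (BoardAll Board : List (String × Int × Int × String))
    (squares : List (String × Int × Int)) (x y : Int) (acc : List String)
    (h : ∀ kv ∈ Board, kv.2.2.2 = King → ∀ sq ∈ squares,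
      pvKingAdj kv.2.1 kv.2.2.1 sq.2.1 sq.2.2 = true → sq.1 ∈ BoardAll.map (fun b => b.1)) :
    (Board.foldl (fun (st : Int × Int × List String) kv =>
        if kv.2.2.2 = King then
          (kv.2.1, kv.2.2.1,
            squares.foldl (fun acc sq =>
              if pvKingAdj kv.2.1 kv.2.2.1 sq.2.1 sq.2.2 then pvLookupAppend BoardAll acc sq.1
              else acc) st.2.2)
        else st) (x, y, acc)).2.2
      = Board.foldl (fun out kv =>
          if kv.2.2.2 = King then
            out ++ (PySem.List.sorted
              (pvKingDeltas.foldl (fun h d =>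
                h ++ (((PySem.List.enumerate squares).foldl
                    (fun d p => d.modify (p.2.2.1, p.2.2.2) [] (· ++ [(p.1, p.2.1)]))
                    PySem.Dict.empty).getD (kv.2.1 + d.1, kv.2.2.1 + d.2) [])) [])
              (fun t => t.1)).map (fun t => t.2)
          else out) acc := by
  induction Board generalizing x y acc with
  | nil => simp
  | cons kv Board ih =>
    have ih' := fun x' y' acc' => ih x' y' acc' (fun b hb => h b (by simp [hb]))
    simp only [List.foldl_cons]
    by_cases hk : kv.2.2.2 = King
    · rw [if_pos hk, if_pos hk, ih']
      congr 1
      rw [pvInnerA BoardAll squares kv.2.1 kv.2.2.1 (h kv (by simp) hk) acc,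
        pvInnerB squares kv.2.1 kv.2.2.1]
    · rw [if_neg hk, if_neg hk]
      exact ih' x y acc

-- ===== VERDICT (by name: the statement is the Claim_ definition above) =====
theorem threatened_squares_king_spec : Claim_equal_threatened_squares_king := by
  intro King Board squares _ hpre
  unfold Spec_threatened_squares_king threatened_squares_king threatened_squares_king_alt
  exact pvOuter King Board Board squares 0 0 [] hpre
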